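-- pv_equiv track=rewrite | github.com/nafeu/dronmakr | settings.py | parse_escaped_csv
-- ===== SOURCE A (Python) =====
-- def parse_escaped_csv(value: str | None) -> list[str]:
--     """
--     Split comma-separated values where commas can be escaped as '\,'.
--     Also supports escaping backslash as '\\'.
--     """
--     if not isinstance(value, str) or not value:
--         return []
--     out: list[str] = []
--     buf: list[str] = []
--     escaped = False
--     for ch in value:
--         if escaped:
--             buf.append(ch)
--             escaped = False
--             continue
--         if ch == "\\":
--             escaped = True
--             continue
--         if ch == ",":
--             item = "".join(buf).strip()
--             if item:
--                 out.append(item)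
--             buf = []
--             continue
--         buf.append(ch)
--     if escaped:
--         buf.append("\\")
--     item = "".join(buf).strip()
--     if item:
--         out.append(item)
--     return out
-- ===== SOURCE B (Python) =====
-- def parse_escaped_csv(value):
--     """Two-pass: tokenize (resolving escapes) then split on separator tokens."""
--     if not isinstance(value, str) or not value:
--         return []
--     # pass 1: tokens, where None marks an unescaped comma and chars are literal
--     tokens = []
--     i = 0
--     n = len(value)
--     while i < n:
--         ch = value[i]
--         if ch == '\\':
--             if i + 1 < n:
--                 tokens.append(value[i + 1])
--                 i += 2
--             else:
--                 tokens.append('\\')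
--                 i += 1
--         elif ch == ',':
--             tokens.append(None)
--             i += 1
--         else:
--             tokens.append(ch)
--             i += 1
--     # pass 2: split on None, then strip and drop empties
--     fields, cur = [], []
--     for t in tokens:
--         if t is None:
--             fields.append(cur)
--             cur = []
--         else:
--             cur.append(t)
--     fields.append(cur)
--     return [item for item in (''.join(f).strip() for f in fields) if item]
-- ===== Notes on version B (the rewrite author's own statement) =====
-- stated objective: alternative
-- what changed: Replaced the single-pass escaped-flag state machine that accumulates output fields as it goes with a two-pass design: an index-driven tokenizer that resolves escapes into literal chars (None marking an unescaped comma), then a split-on-separator pass with strip/filter done by comprehension.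
import Mathlib
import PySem

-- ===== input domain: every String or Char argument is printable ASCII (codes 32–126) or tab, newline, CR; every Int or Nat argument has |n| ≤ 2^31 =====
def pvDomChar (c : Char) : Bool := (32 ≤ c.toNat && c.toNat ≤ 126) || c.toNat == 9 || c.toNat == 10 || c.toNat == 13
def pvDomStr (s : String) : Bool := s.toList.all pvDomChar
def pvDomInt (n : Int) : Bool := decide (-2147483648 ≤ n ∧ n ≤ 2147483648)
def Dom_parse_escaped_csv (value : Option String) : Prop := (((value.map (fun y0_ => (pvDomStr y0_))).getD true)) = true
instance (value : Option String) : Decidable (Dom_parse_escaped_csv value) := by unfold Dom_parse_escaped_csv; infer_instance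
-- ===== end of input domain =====

-- B re-implements the per-character state machine as tokenize-then-split (two passes); same value everywhere, no speed claim.

-- ===== PORT A =====
-- A's loop: state = (buf, escaped, out); each branch in source order.
def pvLoopA : List Char → List Char → Bool → List String → List String
  | [], buf, escaped, out =>
      let buf := if escaped then buf ++ ['\\'] else buf
      let item := PySem.Str.strip (String.ofList buf)
      if item ≠ "" then out ++ [item] else out
  | ch :: rest, buf, escaped, out =>
      if escaped then pvLoopA rest (buf ++ [ch]) false out
      else if ch = '\\' then pvLoopA rest buf true out
      else if ch = ',' then
        let item := PySem.Str.strip (String.ofList buf)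
        pvLoopA rest [] false (if item ≠ "" then out ++ [item] else out)
      else pvLoopA rest (buf ++ [ch]) false out

def parse_escaped_csv (value : Option String) : List String :=
  match value with
  | none => []
  | some s => if s = "" then [] else pvLoopA s.toList [] false []

-- ===== PORT B =====
-- pass 1: escapes resolved; none = unescaped comma, some c = literal char
def pvTokenize : List Char → List (Option Char)
  | [] => []
  | '\\' :: c :: rest => some c :: pvTokenize rest
  | '\\' :: [] => [some '\\']
  | ',' :: rest => none :: pvTokenize rest
  | c :: rest => some c :: pvTokenize rest

-- pass 2: split the token list at the none markers
def pvSplit : List (Option Char) → List (List Char)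
  | [] => [[]]
  | none :: rest => [] :: pvSplit rest
  | some c :: rest =>
      match pvSplit rest with
      | [] => [[c]]   -- unreachable: pvSplit is never []
      | f :: fs => (c :: f) :: fs

def parse_escaped_csv_alt (value : Option String) : List String :=
  match value with
  | none => []
  | some s =>
      if s = "" then [] else
      ((pvSplit (pvTokenize s.toList)).map
        (fun f => PySem.Str.strip (String.ofList f))).filter (fun item => item ≠ "")

-- ===== PRECONDITION & SPEC =====
def Spec_parse_escaped_csv (value : Option String) (out : List String) : Prop := out = parse_escaped_csv_alt value
instance (value : Option String) (out : List String) : Decidable (Spec_parse_escaped_csv value out) := by unfold Spec_parse_escaped_csv; infer_instance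

-- ===== CLAIM (what is proved, stated in full; the proofs are below) =====
def Claim_equal_parse_escaped_csv : Prop := ∀ (value : Option String), Dom_parse_escaped_csv value → Spec_parse_escaped_csv value (parse_escaped_csv value)

-- ===== LEMMAS AND PROOFS =====

-- prepend buf to the first field (or make it the only field)
def pvPrefixHead (buf : List Char) : List (List Char) → List (List Char)
  | [] => [buf]
  | f :: fs => (buf ++ f) :: fs

def pvFin (fs : List (List Char)) : List String :=
  (fs.map (fun f => PySem.Str.strip (String.ofList f))).filter (fun item => item ≠ "")

lemma pvSplit_ne_nil (t : List (Option Char)) : pvSplit t ≠ [] := by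
  induction t with
  | nil => simp [pvSplit]
  | cons h rest ih =>
    cases h with
    | none => simp [pvSplit]
    | some c =>
      simp only [pvSplit]
      cases hs : pvSplit rest with
      | nil => exact absurd hs ih
      | cons f fs => simp

lemma pvPrefixHead_nil (l : List (List Char)) (h : l ≠ []) : pvPrefixHead [] l = l := by
  cases l with
  | nil => exact absurd rfl h
  | cons f fs => simp [pvPrefixHead]

lemma pvPrefixHead_split_some (buf : List Char) (c : Char) (t : List (Option Char)) :
    pvPrefixHead buf (pvSplit (some c :: t)) = pvPrefixHead (buf ++ [c]) (pvSplit t) := by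
  cases hs : pvSplit t with
  | nil => exact absurd hs (pvSplit_ne_nil t)
  | cons f fs => simp [pvSplit, hs, pvPrefixHead]

lemma pvFin_cons (f : List Char) (fs : List (List Char)) :
    pvFin (f :: fs) =
      (if PySem.Str.strip (String.ofList f) ≠ "" then [PySem.Str.strip (String.ofList f)] else []) ++ pvFin fs := by
  simp only [pvFin, List.map, List.filter]
  split_ifs with h
  · simp [h]
  · simp at h; simp [h]

lemma pvLoopA_eq (cs : List Char) : ∀ (buf : List Char) (out : List String),
    pvLoopA cs buf false out = out ++ pvFin (pvPrefixHead buf (pvSplit (pvTokenize cs)))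
    ∧ pvLoopA cs buf true out = out ++ pvFin (pvPrefixHead buf (pvSplit (pvTokenize ('\\' :: cs)))) := by
  induction cs with
  | nil =>
    intro buf out
    constructor
    · simp only [pvLoopA, pvTokenize, pvSplit, pvPrefixHead, if_neg (Bool.false_ne_true), pvFin_cons]
      simp [pvFin]; split_ifs <;> simp
    · simp only [pvLoopA, pvTokenize, pvSplit, pvPrefixHead, pvFin_cons]
      simp [pvFin]; split_ifs <;> simp
  | cons ch rest ih =>
    intro buf out
    constructor
    · by_cases hb : ch = '\\'
      · subst hb
        rw [show pvLoopA ('\\' :: rest) buf false out = pvLoopA rest buf true out from by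
          simp [pvLoopA]]
        exact (ih buf out).2
      · by_cases hc : ch = ','
        · subst hc
          rw [show pvLoopA (',' :: rest) buf false out
              = pvLoopA rest [] false
                  (if PySem.Str.strip (String.ofList buf) ≠ "" then out ++ [PySem.Str.strip (String.ofList buf)] else out)
            from by simp [pvLoopA]]
          rw [(ih [] _).1]
          rw [show pvTokenize (',' :: rest) = none :: pvTokenize rest from by simp [pvTokenize]]
          rw [show pvSplit (none :: pvTokenize rest) = [] :: pvSplit (pvTokenize rest) from by
            simp [pvSplit]]
          rw [show pvPrefixHead buf ([] :: pvSplit (pvTokenize rest)) = buf :: pvSplit (pvTokenize rest) from by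
            simp [pvPrefixHead]]
          rw [pvFin_cons, pvPrefixHead_nil _ (pvSplit_ne_nil _)]
          split_ifs <;> simp
        · rw [show pvLoopA (ch :: rest) buf false out = pvLoopA rest (buf ++ [ch]) false out from by
            simp [pvLoopA, hb, hc]]
          rw [(ih (buf ++ [ch]) out).1]
          rw [show pvTokenize (ch :: rest) = some ch :: pvTokenize rest from by
            cases rest <;> simp [pvTokenize, hb]]
          rw [pvPrefixHead_split_some]
    · rw [show pvLoopA (ch :: rest) buf true out = pvLoopA rest (buf ++ [ch]) false out from by
        simp [pvLoopA]]
      rw [(ih (buf ++ [ch]) out).1]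
      rw [show pvTokenize ('\\' :: ch :: rest) = some ch :: pvTokenize rest from by
        simp [pvTokenize]]
      rw [pvPrefixHead_split_some]

-- ===== VERDICT (by name: the statement is the Claim_ definition above) =====
theorem parse_escaped_csv_spec : Claim_equal_parse_escaped_csv := by
  unfold Claim_equal_parse_escaped_csv
  intro value _
  unfold Spec_parse_escaped_csv parse_escaped_csv parse_escaped_csv_alt
  cases value with
  | none => rfl
  | some s =>
    by_cases h : s = ""
    · simp [h]
    · simp only [h, ite_false]
      rw [(pvLoopA_eq s.toList [] []).1, pvPrefixHead_nil _ (pvSplit_ne_nil _)]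
      simp [pvFin]
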